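-- pv_equiv track=rewrite | github.com/dennisjackson/heliotorrent | util.py | paths_in_level
-- ===== SOURCE A (Python) =====
-- from typing import Generator, List, Optional, Tuple
--
-- def int_to_parts(tile_number: int) -> List[str]:
--     """
--     Convert an integer tile number to path parts.
--
--     Args:
--         tile_number: The tile number to convert
--
--     Returns:
--         A list of string parts representing the path components
--     """
--     # Pad the number to a multiple of 3 digits
--     tile_str = str(tile_number).zfill(((len(str(tile_number)) + 2) // 3) * 3)
--     # Split into groups of 3 digits
--     parts = [f"{tile_str[j : j + 3]}" for j in range(0, len(tile_str), 3)]
--     # Prefix all but the last part with 'x'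
--     parts = [f"x{x}" for x in parts[:-1]] + [parts[-1]]
--     return parts
--
-- def paths_in_level(
--     start_tile: int, end_tile: int, tree_size: int, partials: int = 0
-- ) -> Generator[str, None, None]:
--     """
--     Generate paths for tiles in a specific level.
--
--     Args:
--         start_tile: First tile to include
--         end_tile: Last tile to include (exclusive)
--         tree_size: Total size of the tree
--         partials: Number of partial entries (0 for none)
--
--     Yields:
--         Path strings for each tile
--     """
--     # Generate paths for complete tiles
--     for i in range(start_tile, min(end_tile, tree_size)):
--         parts = int_to_parts(i)
--         yield "/".join(parts)
--
--     # Generate path for partial tile if needed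
--     if partials:
--         parts = int_to_parts(tree_size)
--         parts[-1] += ".p"  # Mark as partial
--         parts += [str(partials)]
--         yield "/".join(parts)
-- ===== SOURCE B (Python) =====
-- from typing import Generator, List
--
--
-- def int_to_parts(tile_number: int) -> List[str]:
--     """Arithmetic digit grouping: peel 3-digit groups off with % / //,
--     building the list back-to-front (most significant group ends up first);
--     every group but the last gets the 'x' prefix as it is created."""
--     parts = ["%03d" % (tile_number % 1000)]
--     n = tile_number // 1000
--     while n > 0:
--         parts.insert(0, "x%03d" % (n % 1000))
--         n //= 1000
--     return parts
--
--
-- def paths_in_level(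
--     start_tile: int, end_tile: int, tree_size: int, partials: int = 0
-- ) -> Generator[str, None, None]:
--     for i in range(start_tile, min(end_tile, tree_size)):
--         yield "/".join(int_to_parts(i))
--     if partials:
--         # the partial marker and the partials count extend the complete-tile path
--         yield "/".join(int_to_parts(tree_size)) + ".p/" + str(partials)
-- ===== Notes on version B (the rewrite author's own statement) =====
-- stated objective: simpler
-- what changed: int_to_parts now peels 3-digit groups off arithmetically (n % 1000 / n //= 1000), building the list back-to-front with the 'x' prefix attached as each group is created, instead of str/zfill/slicing and a second prefixing pass; the partial-tile path is produced by appending '.p/' + str(partials) to the joined path instead of mutating the parts list.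
-- outside the precondition, e.g. on paths_in_level(-1, 0, 5, 0): A returns ['-01'], B returns ['999']; on paths_in_level(0, 0, -5, 3): A returns ['-05.p/3'], B returns ['995.p/3']
import Mathlib
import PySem

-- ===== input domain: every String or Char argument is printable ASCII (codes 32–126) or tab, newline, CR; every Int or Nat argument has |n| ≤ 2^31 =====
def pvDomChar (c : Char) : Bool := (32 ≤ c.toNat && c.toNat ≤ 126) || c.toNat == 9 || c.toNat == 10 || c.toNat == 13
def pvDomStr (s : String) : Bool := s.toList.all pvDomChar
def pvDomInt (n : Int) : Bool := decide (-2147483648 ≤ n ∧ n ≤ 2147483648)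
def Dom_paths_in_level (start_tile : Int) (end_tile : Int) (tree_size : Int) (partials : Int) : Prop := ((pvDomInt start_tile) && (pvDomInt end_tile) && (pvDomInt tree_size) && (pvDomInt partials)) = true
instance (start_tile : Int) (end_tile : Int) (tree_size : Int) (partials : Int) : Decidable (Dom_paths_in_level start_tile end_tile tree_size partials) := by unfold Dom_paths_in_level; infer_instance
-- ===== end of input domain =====

-- B replaces A's str/zfill/slice digit grouping by arithmetic grouping (n % 1000, n //= 1000,
-- groups collected back-to-front with the 'x' prefix attached as created) and produces the
-- partial-tile path by appending ".p/" + str(partials) to the joined path: simpler, same cost.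
-- A is a generator; the equivalence is about the list of yielded values.

-- ===== PORT A =====
-- int_to_parts: str(n), zfill to a multiple of 3, slice into 3-char groups, prefix all but last with 'x'
def pvA_int_to_parts (tile_number : Int) : List (List Char) :=
  let s := PySem.Int.toChars tile_number
  let tile_str := PySem.Chars.zfill s (PySem.Int.floordiv ((s.length : Int) + 2) 3 * 3)
  let parts := (PySem.List.pyRange 0 (tile_str.length : Int) 3).map
      (fun j => PySem.List.slice tile_str (some j) (some (j + 3)))
  match PySem.List.pyGet? parts (-1) with
  | some last => (PySem.List.slice parts none (some (-1))).map (fun x => 'x' :: x) ++ [last]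
  | none => []   -- unreachable: parts is never empty

def paths_in_level (start_tile : Int) (end_tile : Int) (tree_size : Int) (partials : Int) : List String :=
  ((PySem.List.pyRange start_tile (min end_tile tree_size) 1).map
      (fun i => String.ofList (PySem.Chars.join ['/'] (pvA_int_to_parts i))))
  ++ (if partials ≠ 0 then
        let parts := pvA_int_to_parts tree_size
        match PySem.List.pyGet? parts (-1) with
        | some last =>
            [String.ofList (PySem.Chars.join ['/']
              ((PySem.List.slice parts none (some (-1))) ++ [last ++ ['.', 'p']]
                ++ [PySem.Int.toChars partials]))]
        | none => []   -- unreachable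
      else [])

-- ===== PORT B =====
-- "%03d" % m  (hand port; exact for 0 ≤ m, the only values B formats)
def pvB_pad3 (m : Int) : List Char :=
  let s := PySem.Int.toChars m
  List.replicate (3 - s.length) '0' ++ s

-- the while-loop: prepend "x%03d" % (n % 1000) while n > 0, n //= 1000
def pvB_groups (n : Int) (parts : List (List Char)) : List (List Char) :=
  if 0 < n then
    pvB_groups (PySem.Int.floordiv n 1000) (('x' :: pvB_pad3 (PySem.Int.mod n 1000)) :: parts)
  else parts
termination_by n.toNat
decreasing_by
  rw [PySem.Int.floordiv_eq_ediv_of_pos (by omega : (0:Int) < 1000)]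
  omega

def pvB_int_to_parts (tile_number : Int) : List (List Char) :=
  pvB_groups (PySem.Int.floordiv tile_number 1000) [pvB_pad3 (PySem.Int.mod tile_number 1000)]

def paths_in_level_alt (start_tile : Int) (end_tile : Int) (tree_size : Int) (partials : Int) : List String :=
  ((PySem.List.pyRange start_tile (min end_tile tree_size) 1).map
      (fun i => String.ofList (PySem.Chars.join ['/'] (pvB_int_to_parts i))))
  ++ (if partials ≠ 0 then
        [String.ofList (PySem.Chars.join ['/'] (pvB_int_to_parts tree_size)
          ++ ['.', 'p', '/'] ++ PySem.Int.toChars partials)]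
      else [])

-- ===== PRECONDITION & SPEC =====
-- Pre_ excludes inputs on which a NEGATIVE tile number gets formatted: tile numbers are
-- nonnegative indices, no path is specified for a negative one, and both renderings are
-- arbitrary there (A splits the minus sign into a digit group, e.g. 'x-01/234'; B formats
-- the nonnegative floor-mod residues, e.g. '999'), so neither value is the one to match.
def Pre_paths_in_level (start_tile : Int) (end_tile : Int) (tree_size : Int) (partials : Int) : Prop :=
  (start_tile < min end_tile tree_size → 0 ≤ start_tile) ∧ (partials ≠ 0 → 0 ≤ tree_size)
instance (start_tile : Int) (end_tile : Int) (tree_size : Int) (partials : Int) : Decidable (Pre_paths_in_level start_tile end_tile tree_size partials) := by unfold Pre_paths_in_level; infer_instance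

def pvWitness_paths_in_level : Int × Int × Int × Int := (0, 2, 5, 1)

def Spec_paths_in_level (start_tile : Int) (end_tile : Int) (tree_size : Int) (partials : Int) (out : List String) : Prop := out = paths_in_level_alt start_tile end_tile tree_size partials
instance (start_tile : Int) (end_tile : Int) (tree_size : Int) (partials : Int) (out : List String) : Decidable (Spec_paths_in_level start_tile end_tile tree_size partials out) := by unfold Spec_paths_in_level; infer_instance

-- ===== CLAIM (what is proved, stated in full; the proofs are below) =====
def Claim_equal_paths_in_level : Prop := ∀ (start_tile : Int) (end_tile : Int) (tree_size : Int) (partials : Int), Dom_paths_in_level start_tile end_tile tree_size partials → Pre_paths_in_level start_tile end_tile tree_size partials → Spec_paths_in_level start_tile end_tile tree_size partials (paths_in_level start_tile end_tile tree_size partials)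

-- ===== LEMMAS AND PROOFS =====

-- decimal digits of a Nat, most significant first (reference form of Nat.toDigits 10)
def pvPdig (n : Nat) : List Char :=
  if n < 10 then [Nat.digitChar n] else pvPdig (n / 10) ++ [Nat.digitChar (n % 10)]
decreasing_by omega

-- the three digit characters of r < 1000, zero-padded
def pvTrip (r : Nat) : List Char :=
  [Nat.digitChar (r / 100), Nat.digitChar (r / 10 % 10), Nat.digitChar (r % 10)]

-- 3-digit groups of n, most significant first, no 'x' prefixes
def pvG (n : Nat) : List (List Char) :=
  if n < 1000 then [pvTrip n] else pvG (n / 1000) ++ [pvTrip (n % 1000)]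
decreasing_by omega

-- shared final shape of both int_to_parts
def pvFinish (ps : List (List Char)) : List (List Char) :=
  ps.dropLast.map (fun x => 'x' :: x) ++ ps.getLast?.toList

theorem pvToDigitsCore_eq (f : Nat) : ∀ (n : Nat) (acc : List Char), n < 10 ^ f → 0 < f →
    Nat.toDigitsCore 10 f n acc = pvPdig n ++ acc := by
  induction f with
  | zero => intro n acc _ hf; omega
  | succ f ih =>
    intro n acc h _
    rw [Nat.toDigitsCore]
    by_cases h10 : n < 10
    · rw [if_pos (by omega)]
      conv_rhs => rw [pvPdig]
      rw [if_pos h10]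
      have hmod : n % 10 = n := by omega
      simp [hmod]
    · rw [if_neg (by omega)]
      have hf : 0 < f := by
        rcases Nat.eq_zero_or_pos f with rfl | hf
        · simp at h; omega
        · exact hf
      have hlt : n / 10 < 10 ^ f := by
        have hp : (10:Nat) ^ (f+1) = 10 ^ f * 10 := pow_succ 10 f
        exact Nat.div_lt_of_lt_mul (by omega)
      rw [ih (n / 10) _ hlt hf]
      conv_rhs => rw [pvPdig]
      rw [if_neg h10]
      simp

theorem pvToDigits_eq (n : Nat) : Nat.toDigits 10 n = pvPdig n := by
  have h : n < 10 ^ (n + 1) := by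
    calc n < 10 ^ n := Nat.lt_pow_self (by norm_num)
    _ ≤ 10 ^ (n+1) := Nat.pow_le_pow_right (by norm_num) (Nat.le_succ n)
  simpa using pvToDigitsCore_eq (n+1) n [] h (Nat.succ_pos n)

theorem pvToChars_nat (n : Nat) : PySem.Int.toChars (n : Int) = pvPdig n := by
  unfold PySem.Int.toChars
  rw [if_neg (by omega)]
  simpa using pvToDigits_eq n

theorem pvPdig_first (n : Nat) : ∃ d tl, pvPdig n = Nat.digitChar d :: tl ∧ d < 10 := by
  induction n using Nat.strong_induction_on with
  | _ n ih =>
    by_cases h : n < 10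
    · exact ⟨n, [], by rw [pvPdig, if_pos h], h⟩
    · obtain ⟨d, tl, hd, hdlt⟩ := ih (n / 10) (by omega)
      exact ⟨d, tl ++ [Nat.digitChar (n % 10)], by rw [pvPdig, if_neg h, hd]; simp, hdlt⟩

theorem pvDigitChar_not_sign (d : Nat) (h : d < 10) :
    ¬(Nat.digitChar d = '+' ∨ Nat.digitChar d = '-') := by
  interval_cases d <;> decide

-- zfill on a digit string is plain left padding with '0'
theorem pvZfill_digits (cs : List Char) (w : Int)
    (hcs : ∃ d tl, cs = Nat.digitChar d :: tl ∧ d < 10) :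
    PySem.Chars.zfill cs w = List.replicate (w.toNat - cs.length) '0' ++ cs := by
  obtain ⟨d, tl, hdc, hdlt⟩ := hcs
  subst hdc
  by_cases hw : w ≤ ((Nat.digitChar d :: tl).length : Int)
  · rw [PySem.Chars.zfill, if_pos hw]
    have h0 : w.toNat - (tl.length + 1) = 0 := by
      simp only [List.length_cons] at hw; omega
    simp [h0]
  · simp only [PySem.Chars.zfill, if_neg hw]
    rw [if_neg (pvDigitChar_not_sign d hdlt)]

-- common padding computation: pad pvPdig r to 3 characters (r < 1000)
theorem pvRep3 (r : Nat) (h : r < 1000) :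
    List.replicate (3 - (pvPdig r).length) '0' ++ pvPdig r = pvTrip r := by
  by_cases h10 : r < 10
  · rw [pvPdig, if_pos h10]
    have h1 : r / 100 = 0 := by omega
    have h2 : r / 10 % 10 = 0 := by omega
    have h3 : r % 10 = r := by omega
    simp [pvTrip, h1, h2, h3, List.replicate]
    rfl
  · by_cases h100 : r < 100
    · rw [pvPdig, if_neg h10, pvPdig, if_pos (by omega)]
      have h1 : r / 100 = 0 := by omega
      have h2 : r / 10 % 10 = r / 10 := by omega
      simp [pvTrip, h1, h2]
      rfl
    · rw [pvPdig, if_neg h10, pvPdig, if_neg (by omega), pvPdig, if_pos (by omega)]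
      have h1 : r / 10 / 10 = r / 100 := by omega
      simp [pvTrip, h1]

theorem pvPdig_ge1000 (n : Nat) (h : 1000 ≤ n) :
    pvPdig n = pvPdig (n / 1000) ++ pvTrip (n % 1000) := by
  rw [pvPdig, if_neg (by omega), pvPdig, if_neg (by omega), pvPdig, if_neg (by omega)]
  have e1 : n / 10 / 10 = n / 100 := by omega
  have e2 : n / 100 / 10 = n / 1000 := by omega
  have e3 : n / 100 % 10 = n % 1000 / 100 := by omega
  have e4 : n / 10 % 10 = n % 1000 / 10 % 10 := by omega
  have e5 : n % 10 = n % 1000 % 10 := by omega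
  rw [e1, e2, e3, e4, e5]
  simp [pvTrip]

-- the zfill-padded digit string of n
def pvPadded (n : Nat) : List Char :=
  List.replicate ((((pvPdig n).length + 2) / 3) * 3 - (pvPdig n).length) '0' ++ pvPdig n

theorem pvPadded_len (n : Nat) : (pvPadded n).length = (((pvPdig n).length + 2) / 3) * 3 := by
  unfold pvPadded
  simp
  omega

theorem pvPdig_len_le3 (r : Nat) (h : r < 1000) : (pvPdig r).length ≤ 3 ∧ 1 ≤ (pvPdig r).length := by
  have := pvRep3 r h
  have hl : (List.replicate (3 - (pvPdig r).length) '0' ++ pvPdig r).length = 3 := by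
    rw [this]; rfl
  simp at hl
  constructor
  · omega
  · obtain ⟨d, tl, hd, _⟩ := pvPdig_first r
    rw [hd]; simp

theorem pvPadded_base (n : Nat) (h : n < 1000) : pvPadded n = pvTrip n := by
  obtain ⟨hle, hge⟩ := pvPdig_len_le3 n h
  unfold pvPadded
  have : (((pvPdig n).length + 2) / 3) * 3 = 3 := by omega
  rw [this]
  exact pvRep3 n h

theorem pvPadded_step (n : Nat) (h : 1000 ≤ n) :
    pvPadded n = pvPadded (n / 1000) ++ pvTrip (n % 1000) := by
  unfold pvPadded
  rw [pvPdig_ge1000 n h]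
  have hlen : (pvPdig (n / 1000) ++ pvTrip (n % 1000)).length = (pvPdig (n / 1000)).length + 3 := by
    simp [pvTrip]
  rw [hlen]
  have e : (((pvPdig (n / 1000)).length + 3 + 2) / 3) * 3 - ((pvPdig (n / 1000)).length + 3)
      = (((pvPdig (n / 1000)).length + 2) / 3) * 3 - (pvPdig (n / 1000)).length := by omega
  rw [e]
  simp

theorem pvPadded_len_mod3 (n : Nat) : (pvPadded n).length % 3 = 0 ∧ 3 ≤ (pvPadded n).length := by
  rw [pvPadded_len]
  obtain ⟨d, tl, hd, _⟩ := pvPdig_first n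
  have : 1 ≤ (pvPdig n).length := by rw [hd]; simp
  omega

-- range(0, w, 3) as a Nat-range map
theorem pvRange3 (w : Nat) :
    PySem.List.pyRange 0 (w : Int) 3 = (List.range ((w + 2) / 3)).map (fun k => ((3 * k : Nat) : Int)) := by
  rw [PySem.List.pyRange_of_pos 0 w (by omega : (0:Int) < 3)]
  have hc : (if (0:Int) < (w : Int) then (((w : Int) - 0 + 3 - 1) / 3).toNat else 0) = (w + 2) / 3 := by
    split <;> omega
  rw [hc]
  apply List.map_congr_left
  intro k _
  push_cast
  ring

-- xs[j : j+3] for a Nat j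
theorem pvSliceCast {α : Type} (t : List α) (j : Nat) :
    PySem.List.slice t (some ((j : Nat) : Int)) (some (((j : Nat) : Int) + 3)) = (t.drop j).take 3 := by
  rw [show ((j : Nat) : Int) + 3 = ((j + 3 : Nat) : Int) by push_cast; ring, PySem.List.slice_natCast]
  congr 1
  omega

-- slices of the padded string are the groups
theorem pvSlices (n : Nat) :
    (PySem.List.pyRange 0 ((pvPadded n).length : Int) 3).map
      (fun j => PySem.List.slice (pvPadded n) (some j) (some (j + 3))) = pvG n := by
  induction n using Nat.strong_induction_on with
  | _ n ih =>
    by_cases h : n < 1000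
    · rw [pvG, if_pos h, pvPadded_base n h]
      rw [show (pvTrip n).length = 3 from rfl]
      rw [pvRange3 3]
      simp only [show (3 + 2) / 3 = 1 from rfl, List.range_one, List.map_cons, List.map_nil]
      rw [show (3 * 0 : Nat) = (0 : Nat) from rfl, pvSliceCast (pvTrip n) 0]
      rfl
    · obtain ⟨hmod, hge⟩ := pvPadded_len_mod3 (n / 1000)
      have hq : n / 1000 < n := by omega
      have hpad := pvPadded_step n (by omega)
      have hlen : (pvPadded n).length = (pvPadded (n / 1000)).length + 3 := by
        rw [hpad]; simp [pvTrip]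
      rw [pvG, if_neg h, hpad, ← hpad, hlen]
      rw [pvRange3]
      have hcnt : ((pvPadded (n / 1000)).length + 3 + 2) / 3
          = ((pvPadded (n / 1000)).length + 2) / 3 + 1 := by omega
      rw [hcnt, List.range_succ, List.map_append, List.map_append]
      congr 1
      · -- the first groups are the groups of n / 1000
        rw [← ih (n / 1000) hq, pvRange3, List.map_map, List.map_map]
        apply List.map_congr_left
        intro k hk
        simp only [Function.comp_apply]
        rw [pvSliceCast, pvSliceCast, hpad]
        have h3k : 3 * k + 3 ≤ (pvPadded (n / 1000)).length := by
          rw [List.mem_range] at hk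
          omega
        rw [List.drop_append_of_le_length (by omega)]
        rw [List.take_append_of_le_length (by simp; omega)]
      · -- the last slice is the last group
        simp only [List.map_cons, List.map_nil]
        have hj : 3 * (((pvPadded (n / 1000)).length + 2) / 3) = (pvPadded (n / 1000)).length := by
          omega
        rw [hj, pvSliceCast, hpad, List.drop_left]
        rfl

theorem pvG_ne_nil (n : Nat) : pvG n ≠ [] := by
  rw [pvG]
  split <;> simp

-- A's int_to_parts computes pvFinish (pvG n) for a nonnegative argument
theorem pvA_eq (n : Nat) : pvA_int_to_parts (n : Int) = pvFinish (pvG n) := by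
  simp only [pvA_int_to_parts]
  rw [pvToChars_nat]
  have hw : PySem.Int.floordiv (((pvPdig n).length : Int) + 2) 3 * 3
      = (((((pvPdig n).length + 2) / 3 * 3 : Nat)) : Int) := by
    rw [show ((pvPdig n).length : Int) + 2 = (((pvPdig n).length + 2 : Nat) : Int) by push_cast; ring,
        show (3:Int) = ((3:Nat) : Int) from rfl, PySem.Int.floordiv_natCast]
    push_cast
    ring
  rw [hw, pvZfill_digits _ _ (pvPdig_first n)]
  have hpad : List.replicate (((((pvPdig n).length + 2) / 3 * 3 : Nat) : Int).toNat
      - (pvPdig n).length) '0' ++ pvPdig n = pvPadded n := by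
    unfold pvPadded
    rw [show (((((pvPdig n).length + 2) / 3 * 3 : Nat)) : Int).toNat
      = ((pvPdig n).length + 2) / 3 * 3 from by omega]
  rw [hpad, pvSlices n]
  rw [PySem.List.pyGet?_neg_one, PySem.List.slice_to_neg_one,
      List.getLast?_eq_some_getLast (pvG_ne_nil n)]
  unfold pvFinish
  rw [List.getLast?_eq_some_getLast (pvG_ne_nil n)]
  rfl

-- %03d of r < 1000 is the digit triple
theorem pvPad3 (r : Nat) (h : r < 1000) : pvB_pad3 ((r : Nat) : Int) = pvTrip r := by
  unfold pvB_pad3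
  rw [pvToChars_nat]
  exact pvRep3 r h

theorem pvB_groups_eq (q : Nat) : ∀ acc, pvB_groups ((q : Nat) : Int) acc =
    if q = 0 then acc else (pvG q).map (fun x => 'x' :: x) ++ acc := by
  induction q using Nat.strong_induction_on with
  | _ q ih =>
    intro acc
    by_cases hq : q = 0
    · subst hq
      rw [pvB_groups, if_neg (by omega), if_pos rfl]
    · rw [pvB_groups, if_pos (by exact_mod_cast Nat.pos_of_ne_zero hq)]
      rw [show (1000:Int) = ((1000:Nat) : Int) from rfl, PySem.Int.floordiv_natCast,
          PySem.Int.mod_natCast, pvPad3 (q % 1000) (by omega)]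
      rw [ih (q / 1000) (by omega)]
      by_cases h1 : q < 1000
      · have h0 : q / 1000 = 0 := by omega
        have hm : q % 1000 = q := by omega
        rw [h0, if_pos rfl, if_neg hq, hm]
        conv_rhs => rw [pvG, if_pos h1]
        simp
      · rw [if_neg (by omega : ¬ q / 1000 = 0), if_neg hq]
        conv_rhs => rw [pvG, if_neg h1]
        simp

theorem pvB_eq (n : Nat) : pvB_int_to_parts (n : Int) = pvFinish (pvG n) := by
  unfold pvB_int_to_parts
  rw [show (1000:Int) = ((1000:Nat) : Int) from rfl, PySem.Int.floordiv_natCast,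
      PySem.Int.mod_natCast, pvPad3 (n % 1000) (by omega), pvB_groups_eq (n / 1000)]
  by_cases h : n < 1000
  · have h0 : n / 1000 = 0 := by omega
    have hm : n % 1000 = n := by omega
    rw [h0, if_pos rfl, hm]
    unfold pvFinish
    conv_rhs => rw [pvG, if_pos h]
    rfl
  · rw [if_neg (by omega : ¬ n / 1000 = 0)]
    unfold pvFinish
    conv_rhs => rw [pvG, if_neg h, List.dropLast_concat, List.getLast?_concat]
    rfl

theorem pvAB (i : Int) (h : 0 ≤ i) : pvA_int_to_parts i = pvB_int_to_parts i := by
  obtain ⟨n, rfl⟩ : ∃ n : Nat, i = (n : Int) := ⟨i.toNat, by omega⟩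
  rw [pvA_eq, pvB_eq]

theorem pvJoin_cons (sep p : List Char) (rest : List (List Char)) (h : rest ≠ []) :
    PySem.Chars.join sep (p :: rest) = p ++ sep ++ PySem.Chars.join sep rest := by
  cases rest with
  | nil => exact absurd rfl h
  | cons q rest' => exact PySem.Chars.join_cons_cons sep p q rest'

theorem pvJoin_partial (pre : List (List Char)) (l str : List Char) :
    PySem.Chars.join ['/'] (pre ++ [l ++ ['.', 'p']] ++ [str])
      = PySem.Chars.join ['/'] (pre ++ [l]) ++ ['.', 'p', '/'] ++ str := by
  induction pre with
  | nil =>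
    simp [PySem.Chars.join_cons_cons, PySem.Chars.join_singleton]
  | cons p pre ih =>
    simp only [List.cons_append]
    rw [pvJoin_cons ['/'] p (pre ++ [l ++ ['.', 'p']] ++ [str]) (by simp),
        pvJoin_cons ['/'] p (pre ++ [l]) (by simp), ih]
    simp

-- ===== VERDICT (by name: the statement is the Claim_ definition above) =====
theorem paths_in_level_spec : Claim_equal_paths_in_level := by
  intro start_tile end_tile tree_size partials _ hPre
  unfold Spec_paths_in_level paths_in_level paths_in_level_alt
  congr 1
  · apply List.map_congr_left
    intro i hi
    rw [PySem.List.mem_pyRange_one] at hi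
    have h0 : 0 ≤ i := le_trans (hPre.1 (lt_of_le_of_lt hi.1 hi.2)) hi.1
    rw [pvAB i h0]
  · by_cases hp : partials ≠ 0
    · rw [if_pos hp, if_pos hp]
      have ht : 0 ≤ tree_size := hPre.2 hp
      obtain ⟨m, rfl⟩ : ∃ m : Nat, tree_size = (m : Int) := ⟨tree_size.toNat, by omega⟩
      rw [pvA_eq m, pvB_eq m]
      have hfin : pvFinish (pvG m) = (pvG m).dropLast.map (fun x => 'x' :: x)
          ++ [(pvG m).getLast (pvG_ne_nil m)] := by
        unfold pvFinish
        rw [List.getLast?_eq_some_getLast (pvG_ne_nil m)]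
        rfl
      rw [hfin]
      simp only [PySem.List.pyGet?_neg_one, List.getLast?_concat,
        PySem.List.slice_to_neg_one, List.dropLast_concat]
      rw [pvJoin_partial]
    · rw [if_neg hp, if_neg hp]
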